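-- pv_equiv track=rewrite | github.com/thanhlucifer/DSA | areKAnagrams/areKAnagrams.py | areKAnagrams
-- ===== SOURCE A (Python) =====
-- from collections import Counter
--
-- def areKAnagrams(str1, str2, k):
--     if len(str1) != len(str2):
--         return False
--
--     frequencyMap = Counter(str1)
--
--     # Step 2: Adjust frequency map based on str2
--     for c in str2:
--         if frequencyMap[c] > 0:
--             frequencyMap[c] -= 1
--
--     count = sum(frequencyMap.values())
--
--     # Step 3: Count remaining characters in the map
--     return count <= k
-- ===== SOURCE B (Python) =====
-- def areKAnagrams(str1, str2, k):
--     if len(str1) != len(str2):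
--         return False
--     a = sorted(str1)
--     b = sorted(str2)
--     n = len(a)
--     i = j = matched = 0
--     while i < n and j < n:
--         if a[i] == b[j]:
--             matched += 1
--             i += 1
--             j += 1
--         elif a[i] < b[j]:
--             i += 1
--         else:
--             j += 1
--     return len(str1) - matched <= k
-- ===== Notes on version B (the rewrite author's own statement) =====
-- stated objective: alternative
-- what changed: Replaces the Counter build plus per-character decrement loop and value summation with sorting both strings and a two-pointer merge that counts matched characters; replacements needed = n - matched.
import Mathlib
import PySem

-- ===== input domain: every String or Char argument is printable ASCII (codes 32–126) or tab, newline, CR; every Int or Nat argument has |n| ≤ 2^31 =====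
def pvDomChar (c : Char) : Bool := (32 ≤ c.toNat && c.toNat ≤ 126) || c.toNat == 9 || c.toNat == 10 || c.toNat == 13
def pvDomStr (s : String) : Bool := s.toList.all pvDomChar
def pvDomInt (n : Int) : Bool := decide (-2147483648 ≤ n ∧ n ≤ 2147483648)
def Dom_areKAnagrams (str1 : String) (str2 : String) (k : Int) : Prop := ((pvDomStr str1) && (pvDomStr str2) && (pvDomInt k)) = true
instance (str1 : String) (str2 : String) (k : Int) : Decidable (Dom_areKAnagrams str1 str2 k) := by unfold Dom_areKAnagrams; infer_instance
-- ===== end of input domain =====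

-- B replaces A's Counter-and-decrement pass by sorting both strings and counting matched characters
-- with a two-pointer merge (alternative algorithm, similar cost); return values proved equal everywhere.

-- ===== PORT A =====
def areKAnagrams (str1 : String) (str2 : String) (k : Int) : Bool :=
  if PySem.Str.len str1 ≠ PySem.Str.len str2 then false
  else
    let frequencyMap := PySem.Dict.counter str1.toList
    let frequencyMap := str2.toList.foldl
      (fun d c => if d.getD c 0 > 0 then d.insert c (d.getD c 0 - 1) else d) frequencyMap
    let count := frequencyMap.values.sum
    decide (count ≤ k)

-- ===== PORT B =====
-- the two-pointer merge over the two sorted lists: counts matching positions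
def mergeMatched : List Char → List Char → Int
  | [], _ => 0
  | _ :: _, [] => 0
  | a :: as, b :: bs =>
    if a = b then mergeMatched as bs + 1
    else if a < b then mergeMatched as (b :: bs)
    else mergeMatched (a :: as) bs

def areKAnagrams_alt (str1 : String) (str2 : String) (k : Int) : Bool :=
  if PySem.Str.len str1 ≠ PySem.Str.len str2 then false
  else
    let a := PySem.List.sorted str1.toList (fun x => x) false
    let b := PySem.List.sorted str2.toList (fun x => x) false
    let matched := mergeMatched a b
    decide (PySem.Str.len str1 - matched ≤ k)

-- ===== PRECONDITION & SPEC =====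
def Spec_areKAnagrams (str1 : String) (str2 : String) (k : Int) (out : Bool) : Prop := out = areKAnagrams_alt str1 str2 k
instance (str1 : String) (str2 : String) (k : Int) (out : Bool) : Decidable (Spec_areKAnagrams str1 str2 k out) := by unfold Spec_areKAnagrams; infer_instance

-- ===== CLAIM (what is proved, stated in full; the proofs are below) =====
def Claim_equal_areKAnagrams : Prop := ∀ (str1 : String) (str2 : String) (k : Int), Dom_areKAnagrams str1 str2 k → Spec_areKAnagrams str1 str2 k (areKAnagrams str1 str2 k)

-- ===== LEMMAS AND PROOFS =====

-- A's decrement loop, pointwise: each key ends at max (start − occurrences in str2) 0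
theorem loop_getD (t : List Char) : ∀ (d : PySem.Dict Char Int) (c : Char), 0 ≤ d.getD c 0 →
    (t.foldl (fun d c => if d.getD c 0 > 0 then d.insert c (d.getD c 0 - 1) else d) d).getD c 0
      = max (d.getD c 0 - (t.count c : Int)) 0 := by
  induction t with
  | nil => intro d c h; simp; omega
  | cons a t ih =>
    intro d c h
    simp only [List.foldl_cons]
    by_cases hca : c = a
    · subst hca
      by_cases hgt : d.getD c 0 > 0
      · simp only [hgt, if_pos]
        rw [ih _ _ (by rw [PySem.Dict.getD_insert_self]; omega)]
        rw [PySem.Dict.getD_insert_self]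
        simp
        omega
      · simp only [hgt, if_false]
        rw [ih _ _ h]
        simp
        omega
    · have hac' : a ≠ c := fun e => hca e.symm
      by_cases hgt : d.getD a 0 > 0
      · simp only [hgt, if_pos]
        rw [ih _ _ (by rw [PySem.Dict.getD_insert]; simp [hca]; exact h)]
        rw [PySem.Dict.getD_insert]
        simp [hca, hac']
      · simp only [hgt, if_false]
        rw [ih _ _ h]
        simp [hac']

-- A's decrement loop never changes the key list
theorem loop_keys (t : List Char) : ∀ (d : PySem.Dict Char Int),
    (t.foldl (fun d c => if d.getD c 0 > 0 then d.insert c (d.getD c 0 - 1) else d) d).keys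
      = d.keys := by
  induction t with
  | nil => intro d; simp
  | cons a t ih =>
    intro d
    simp only [List.foldl_cons]
    rw [ih]
    by_cases hgt : d.getD a 0 > 0
    · simp only [hgt, if_pos]
      apply PySem.Dict.keys_insert_of_contains
      by_cases hc : d.contains a = true
      · exact hc
      · exfalso
        rw [PySem.Dict.getD_of_not_contains (h := by simpa using hc)] at hgt
        omega
    · simp [hgt]

-- sum of the counts of the distinct characters = length
theorem sum_counts (s : List Char) :
    ((PySem.Set.ofList s).map (fun c => ((s.count c : Int)))).sum = (s.length : Int) := by
  have hnd : (PySem.Set.ofList s : List Char).Nodup := PySem.Set.nodup_ofList s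
  have hperm : (PySem.Set.ofList s : List Char).Perm s.dedup := by
    apply List.perm_of_nodup_nodup_toFinset_eq hnd s.nodup_dedup
    ext x
    simp [PySem.Set.mem_ofList, List.mem_dedup]
  rw [List.Perm.sum_eq (hperm.map _)]
  rw [← List.sum_map_count_dedup_eq_length s]
  rw [Nat.cast_list_sum, List.map_map]
  rfl

-- B's merge on sorted lists counts the multiset intersection
theorem mergeMatched_eq_card_inter : ∀ (l1 l2 : List Char), l1.Pairwise (· ≤ ·) → l2.Pairwise (· ≤ ·) →
    mergeMatched l1 l2 = (((l1 : Multiset Char)) ∩ (l2 : Multiset Char)).card := by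
  intro l1
  induction l1 with
  | nil => intro l2 _ _; simp [mergeMatched]
  | cons a as ih =>
    intro l2
    induction l2 with
    | nil => intro _ _; simp [mergeMatched]
    | cons b bs ih2 =>
      intro h1 h2
      rw [mergeMatched]
      by_cases hab : a = b
      · subst hab
        rw [if_pos rfl]
        rw [ih bs h1.of_cons h2.of_cons]
        have hc : ((a :: as : List Char) : Multiset Char) ∩ ((a :: bs : List Char) : Multiset Char)
            = a ::ₘ ((as : Multiset Char) ∩ (bs : Multiset Char)) := by
          rw [show ((a :: as : List Char) : Multiset Char) = a ::ₘ (as : Multiset Char) from rfl,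
              show ((a :: bs : List Char) : Multiset Char) = a ::ₘ (bs : Multiset Char) from rfl]
          rw [Multiset.cons_inter_of_pos _ (Multiset.mem_cons_self a _)]
          rw [Multiset.erase_cons_head]
        rw [hc]
        simp
      · simp only [if_neg hab]
        by_cases hlt : a < b
        · simp only [if_pos hlt]
          rw [ih (b :: bs) h1.of_cons h2]
          have hnotmem : a ∉ ((b :: bs : List Char) : Multiset Char) := by
            simp only [Multiset.mem_coe, List.mem_cons]
            rintro (rfl | hm)
            · exact hab rfl
            · exact absurd hlt (not_lt.mpr ((List.pairwise_cons.mp h2).1 a hm))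
          rw [show ((a :: as : List Char) : Multiset Char) = a ::ₘ (as : Multiset Char) from rfl,
              Multiset.cons_inter_of_neg _ hnotmem]
        · simp only [if_neg hlt]
          rw [ih2 h1 h2.of_cons]
          have hba : b < a := lt_of_le_of_ne (not_lt.mp hlt) (fun e => hab e.symm)
          have hnotmem : b ∉ ((a :: as : List Char) : Multiset Char) := by
            simp only [Multiset.mem_coe, List.mem_cons]
            rintro (rfl | hm)
            · exact hab rfl
            · exact absurd hba (not_lt.mpr ((List.pairwise_cons.mp h1).1 b hm))
          have hco : ((a :: as : List Char) : Multiset Char) ∩ ((b :: bs : List Char) : Multiset Char)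
              = ((a :: as : List Char) : Multiset Char) ∩ ((bs : List Char) : Multiset Char) := by
            rw [Multiset.inter_comm,
                show ((b :: bs : List Char) : Multiset Char) = b ::ₘ (bs : Multiset Char) from rfl,
                Multiset.cons_inter_of_neg _ hnotmem, Multiset.inter_comm]
          rw [hco]

-- intersection size as a sum of per-character minima over the distinct characters of s
theorem card_inter_eq_sum (s t : List Char) :
    ((((s : Multiset Char)) ∩ (t : Multiset Char)).card : Int)
      = ((PySem.Set.ofList s).map (fun c => min ((s.count c : Int)) ((t.count c : Int)))).sum := by
  have hnd : (PySem.Set.ofList s : List Char).Nodup := PySem.Set.nodup_ofList s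
  have htf : (PySem.Set.ofList s : List Char).toFinset = s.toFinset := by
    ext x; simp [PySem.Set.mem_ofList]
  have hcard : ((↑s ∩ ↑t : Multiset Char)).card = ∑ a ∈ s.toFinset, min (s.count a) (t.count a) := by
    rw [← Multiset.toFinset_sum_count_eq]
    rw [Finset.sum_subset (by
          intro a ha
          simp only [Multiset.mem_toFinset, Multiset.mem_inter] at ha
          exact List.mem_toFinset.mpr (Multiset.mem_coe.mp ha.1))
        (by
          intro a _ hnm
          simp only [Multiset.mem_toFinset] at hnm
          exact Multiset.count_eq_zero.mpr hnm)]
    apply Finset.sum_congr rfl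
    intro a _
    rw [Multiset.count_inter]
    simp
  rw [hcard]
  rw [← htf, List.sum_toFinset _ hnd]
  rw [Nat.cast_list_sum, List.map_map]
  apply congrArg
  apply List.map_congr_left
  intro a _
  simp [Nat.cast_min]

-- pointwise difference of list sums over the same index list
theorem list_sum_map_sub (l : List Char) (g h : Char → Int) :
    (l.map (fun c => g c - h c)).sum = (l.map g).sum - (l.map h).sum := by
  induction l with
  | nil => simp
  | cons a l ih => simp [ih]; ring

-- A's final count = |str1| − |multiset intersection|
theorem countA_eq (s t : List Char) :
    ((t.foldl (fun d c => if d.getD c 0 > 0 then d.insert c (d.getD c 0 - 1) else d)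
        (PySem.Dict.counter s)).values).sum
      = (s.length : Int) - ((((s : Multiset Char)) ∩ (t : Multiset Char)).card : Int) := by
  have hkeys : (t.foldl (fun d c => if d.getD c 0 > 0 then d.insert c (d.getD c 0 - 1) else d)
      (PySem.Dict.counter s)).keys = PySem.Set.ofList s := by
    rw [loop_keys, PySem.Dict.keys_counter]
  have hnd : (t.foldl (fun d c => if d.getD c 0 > 0 then d.insert c (d.getD c 0 - 1) else d)
      (PySem.Dict.counter s)).keys.Nodup := by
    rw [hkeys]; exact PySem.Set.nodup_ofList s
  rw [PySem.Dict.values_eq_map_keys _ hnd 0, hkeys]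
  have hget : ∀ c, (t.foldl (fun d c => if d.getD c 0 > 0 then d.insert c (d.getD c 0 - 1) else d)
      (PySem.Dict.counter s)).getD c 0 = max ((s.count c : Int) - (t.count c : Int)) 0 := by
    intro c
    rw [loop_getD t _ c (by rw [PySem.Dict.getD_counter]; positivity)]
    rw [PySem.Dict.getD_counter]
  rw [List.map_congr_left (fun c _ => hget c)]
  have hpt : ∀ c : Char, max ((s.count c : Int) - (t.count c : Int)) 0
      = (s.count c : Int) - min ((s.count c : Int)) ((t.count c : Int)) := by
    intro c; omega
  rw [List.map_congr_left (fun c _ => hpt c)]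
  rw [list_sum_map_sub, sum_counts, card_inter_eq_sum]

-- ===== VERDICT (by name: the statement is the Claim_ definition above) =====
theorem areKAnagrams_spec : Claim_equal_areKAnagrams := by
  intro str1 str2 k _
  unfold Spec_areKAnagrams areKAnagrams areKAnagrams_alt
  by_cases hlen : PySem.Str.len str1 ≠ PySem.Str.len str2
  · rw [if_pos hlen, if_pos hlen]
  · rw [if_neg hlen, if_neg hlen]
    have hmerge : mergeMatched (PySem.List.sorted str1.toList (fun x => x) false)
        (PySem.List.sorted str2.toList (fun x => x) false)
        = ((((str1.toList : Multiset Char)) ∩ (str2.toList : Multiset Char)).card : Int) := by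
      rw [mergeMatched_eq_card_inter _ _
        (PySem.List.sorted_pairwise str1.toList (fun x => x))
        (PySem.List.sorted_pairwise str2.toList (fun x => x))]
      congr 1
      · exact congrArg Multiset.card (congrArg₂ (· ∩ ·)
          (Multiset.coe_eq_coe.mpr (PySem.List.sorted_perm str1.toList (fun x => x) false))
          (Multiset.coe_eq_coe.mpr (PySem.List.sorted_perm str2.toList (fun x => x) false)))
    simp only [countA_eq, hmerge]
    rw [show PySem.Str.len str1 = (str1.toList.length : Int) from PySem.Str.len_eq str1]
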